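-- pv_equiv track=rewrite | github.com/whw23/mudasky | backend/api/api/core/permission_tree.py | _find_all_matching_prefixes
-- ===== SOURCE A (Python) =====
-- def _find_all_matching_prefixes(
--     path: str, label_map: dict[str, str]
-- ) -> list[str]:
--     """找到路径匹配的所有标签前缀，按长度从短到长排序。"""
--     matches = []
--     for prefix in label_map:
--         if path.startswith(prefix + "/") or path == prefix:
--             matches.append(prefix)
--     matches.sort(key=len)
--     return matches
-- ===== SOURCE B (Python) =====
-- def _find_all_matching_prefixes(path, label_map):
--     """Walk the path's own '/' boundaries and look each prefix up in the dict
--     instead of scanning every key; results come out already in length order."""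
--     out = []
--     for i, ch in enumerate(path):
--         if ch == "/" and path[:i] in label_map:
--             out.append(path[:i])
--     if path in label_map:
--         out.append(path)
--     return out
-- ===== Notes on version B (the rewrite author's own statement) =====
-- stated objective: alternative
-- what changed: Instead of scanning every key of label_map and testing it against the path and then sorting, B enumerates the path's own '/'-boundary prefixes (plus the full path) in increasing length and looks each up in the dict, so no sort is needed and the work depends on the path, not on the number of keys.
import Mathlib
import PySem

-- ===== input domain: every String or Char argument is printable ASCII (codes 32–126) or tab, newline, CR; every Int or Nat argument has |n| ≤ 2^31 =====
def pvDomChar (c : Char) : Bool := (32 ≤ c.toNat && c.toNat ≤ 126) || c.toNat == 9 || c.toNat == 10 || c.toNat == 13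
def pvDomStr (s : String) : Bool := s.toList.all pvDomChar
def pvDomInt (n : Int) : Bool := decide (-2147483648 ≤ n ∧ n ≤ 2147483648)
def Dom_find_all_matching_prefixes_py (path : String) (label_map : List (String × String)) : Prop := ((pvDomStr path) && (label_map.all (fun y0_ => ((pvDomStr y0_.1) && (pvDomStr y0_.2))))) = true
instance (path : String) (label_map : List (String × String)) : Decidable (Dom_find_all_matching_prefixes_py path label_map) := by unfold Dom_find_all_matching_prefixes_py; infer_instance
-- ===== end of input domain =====

-- B replaces A's scan of every dict key (and the final sort) by walking the path's own
-- '/'-boundary prefixes in increasing length and looking each up in the dict.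

-- ===== PORT A =====
-- for prefix in label_map: if path.startswith(prefix + "/") or path == prefix: matches.append(prefix)
-- (dict iteration = each distinct key once, in first-occurrence order); then matches.sort(key=len)
def find_all_matching_prefixes_py (path : String) (label_map : List (String × String)) : List String :=
  let matches_ : List String :=
    (PySem.List.dedup (label_map.map Prod.fst)).foldl
      (fun acc pfx =>
        if PySem.Chars.startswith path.toList (pfx.toList ++ ['/']) || path == pfx
        then acc ++ [pfx] else acc) []
  PySem.List.sorted matches_ PySem.Str.len

-- ===== PORT B =====
def find_all_matching_prefixes_py_alt (path : String) (label_map : List (String × String)) : List String :=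
  let cs := path.toList
  let out : List String :=
    (PySem.List.enumerate cs).foldl
      (fun acc p =>
        if p.2 == '/' && (PySem.Dict.mk label_map).contains (String.ofList (PySem.List.slice cs none (some p.1)))
        then acc ++ [String.ofList (PySem.List.slice cs none (some p.1))] else acc) []
  if (PySem.Dict.mk label_map).contains path then out ++ [path] else out

-- ===== PRECONDITION & SPEC =====
def Spec_find_all_matching_prefixes_py (path : String) (label_map : List (String × String)) (out : List String) : Prop := out = find_all_matching_prefixes_py_alt path label_map
instance (path : String) (label_map : List (String × String)) (out : List String) : Decidable (Spec_find_all_matching_prefixes_py path label_map out) := by unfold Spec_find_all_matching_prefixes_py; infer_instance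

-- ===== CLAIM (what is proved, stated in full; the proofs are below) =====
def Claim_equal_find_all_matching_prefixes_py : Prop := ∀ (path : String) (label_map : List (String × String)), Dom_find_all_matching_prefixes_py path label_map → Spec_find_all_matching_prefixes_py path label_map (find_all_matching_prefixes_py path label_map)

-- ===== LEMMAS AND PROOFS =====

-- 'path.startswith(pfx + "/")' says pfx is the part of path before some '/' boundary.
theorem pvPrefixSlash_iff (cs xs : List Char) :
    (xs ++ ['/'] <+: cs) ↔ ∃ k, ∃ _ : k < cs.length, cs[k] = '/' ∧ xs = cs.take k := by
  constructor
  · rintro ⟨t, ht⟩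
    have hlen : xs.length < cs.length := by
      have := congrArg List.length ht; simp at this; omega
    refine ⟨xs.length, hlen, ?_, ?_⟩
    · subst ht
      have h9 : (xs ++ ['/'] ++ t)[xs.length]? = some '/' := by
        rw [List.append_assoc, List.getElem?_append_right (Nat.le_refl _)]
        simp
      exact Option.some.inj ((List.getElem?_eq_getElem hlen).symm.trans h9)
    · subst ht
      rw [List.append_assoc]
      exact List.take_left.symm
  · rintro ⟨k, hk, hsl, rfl⟩
    have h : cs.take k ++ ['/'] = cs.take (k + 1) := by
      rw [List.take_add_one, List.getElem?_eq_getElem hk, hsl]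
      rfl
    exact h ▸ List.take_prefix _ _

-- membership in the raw assoc-list dict is membership among the keys
theorem pvContains_iff (lm : List (String × String)) (x : String) :
    (PySem.Dict.mk lm).contains x = true ↔ x ∈ lm.map Prod.fst := by
  simp [PySem.Dict.contains_mk, List.any_eq_true]

-- A's match test, as a predicate
def pvMatch (path pfx : String) : Bool :=
  PySem.Chars.startswith path.toList (pfx.toList ++ ['/']) || path == pfx

-- B written with its loops folded away
theorem pvAlt_eq (path : String) (lm : List (String × String)) :
    find_all_matching_prefixes_py_alt path lm =
      (((PySem.List.enumerate path.toList).filter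
          (fun p => p.2 == '/' && (PySem.Dict.mk lm).contains (String.ofList (PySem.List.slice path.toList none (some p.1))))).map
          (fun p => String.ofList (PySem.List.slice path.toList none (some p.1)))) ++
        (if (PySem.Dict.mk lm).contains path then [path] else []) := by
  simp only [find_all_matching_prefixes_py_alt]
  rw [PySem.List.foldl_append_if
    (p := fun p : Int × Char => p.2 == '/' && (PySem.Dict.mk lm).contains (String.ofList (PySem.List.slice path.toList none (some p.1))))
    (f := fun p : Int × Char => String.ofList (PySem.List.slice path.toList none (some p.1)))]
  split <;> simp

-- every element of B's filtered-enumerate part is the take-k prefix at a real '/' boundary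
theorem pvMemFiltered (path : String) (lm : List (String × String)) (q : Int × Char)
    (hq : q ∈ (PySem.List.enumerate path.toList).filter
          (fun p => p.2 == '/' && (PySem.Dict.mk lm).contains (String.ofList (PySem.List.slice path.toList none (some p.1))))) :
    ∃ k, ∃ _ : k < path.toList.length, q = ((k : Int), path.toList[k]) ∧ path.toList[k] = '/' ∧
      PySem.List.slice path.toList none (some q.1) = path.toList.take k := by
  rcases List.mem_filter.1 hq with ⟨hmem, htest⟩
  rcases (PySem.List.mem_enumerate_iff _ _ _).1 hmem with ⟨k, hk, rfl⟩
  simp only [Bool.and_eq_true, beq_iff_eq] at htest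
  refine ⟨k, hk, by simp, htest.1, ?_⟩
  simp [PySem.List.slice_to_natCast]

-- B's output lists exactly the keys that A's test accepts
theorem pvMemAlt (path : String) (lm : List (String × String)) (x : String) :
    x ∈ find_all_matching_prefixes_py_alt path lm ↔ x ∈ lm.map Prod.fst ∧ pvMatch path x = true := by
  rw [pvAlt_eq]
  constructor
  · intro hx
    rcases List.mem_append.1 hx with hx | hx
    · rcases List.mem_map.1 hx with ⟨q, hq, rfl⟩
      rcases pvMemFiltered path lm q hq with ⟨k, hk, hqe, hslash, hslice⟩
      rcases List.mem_filter.1 hq with ⟨_, htest⟩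
      simp only [Bool.and_eq_true] at htest
      refine ⟨(pvContains_iff lm _).1 htest.2, ?_⟩
      unfold pvMatch
      simp only [Bool.or_eq_true]
      left
      rw [String.toList_ofList, hslice, PySem.Chars.startswith_iff]
      exact (pvPrefixSlash_iff _ _).2 ⟨k, hk, hslash, rfl⟩
    · split at hx
      · rcases List.mem_singleton.1 hx with rfl
        refine ⟨(pvContains_iff lm _).1 (by assumption), ?_⟩
        unfold pvMatch
        simp only [Bool.or_eq_true]
        right
        exact beq_self_eq_true _
      · simp at hx
  · rintro ⟨hmem, hmatch⟩
    unfold pvMatch at hmatch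
    simp only [Bool.or_eq_true] at hmatch
    rcases hmatch with hsw | heq
    · have hpre := (PySem.Chars.startswith_iff _ _).1 hsw
      rcases (pvPrefixSlash_iff _ _).1 hpre with ⟨k, hk, hsl, hxe⟩
      apply List.mem_append.2 ; left
      apply List.mem_map.2
      have hslice : PySem.List.slice path.toList none (some ((k : Int))) = x.toList := by
        rw [PySem.List.slice_to_natCast, ← hxe]
      refine ⟨((k : Int), path.toList[k]), ?_, ?_⟩
      · apply List.mem_filter.2
        refine ⟨(PySem.List.mem_enumerate_iff _ _ _).2 ⟨k, hk, by rw [zero_add]⟩, ?_⟩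
        simp only [Bool.and_eq_true, beq_iff_eq]
        refine ⟨hsl, ?_⟩
        rw [hslice, String.ofList_toList]
        exact (pvContains_iff lm x).2 hmem
      · rw [hslice, String.ofList_toList]
    · have hx : x = path := (beq_iff_eq.1 heq).symm
      subst hx
      apply List.mem_append.2 ; right
      rw [if_pos ((pvContains_iff lm x).2 hmem)]
      exact List.mem_singleton.2 rfl

-- B's output has strictly increasing lengths
theorem pvPairwiseAlt (path : String) (lm : List (String × String)) :
    List.Pairwise (fun a b => PySem.Str.len a < PySem.Str.len b) (find_all_matching_prefixes_py_alt path lm) := by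
  rw [pvAlt_eq]
  have hlen : ∀ q ∈ (PySem.List.enumerate path.toList).filter
      (fun p => p.2 == '/' && (PySem.Dict.mk lm).contains (String.ofList (PySem.List.slice path.toList none (some p.1)))),
      PySem.Str.len (String.ofList (PySem.List.slice path.toList none (some q.1))) = q.1 ∧ q.1 < (path.toList.length : Int) := by
    intro q hq
    rcases pvMemFiltered path lm q hq with ⟨k, hk, hqe, _, hslice⟩
    constructor
    · rw [PySem.Str.len_eq, hslice, hqe]
      have hk' : k < path.length := by simpa using hk
      simp
      omega
    · rw [hqe]; simpa using hk
  apply List.pairwise_append.2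
  refine ⟨?_, ?_, ?_⟩
  · apply List.pairwise_map.2
    have hpw : List.Pairwise (fun p q : Int × Char => p.1 < q.1)
        ((PySem.List.enumerate path.toList).filter
          (fun p => p.2 == '/' && (PySem.Dict.mk lm).contains (String.ofList (PySem.List.slice path.toList none (some p.1))))) :=
      List.Pairwise.filter _ (PySem.List.pairwise_lt_enumerate _ _)
    apply hpw.imp_of_mem
    intro a b ha hb hab
    rw [(hlen a ha).1, (hlen b hb).1]; exact hab
  · split <;> simp
  · intro a ha b hb
    rcases List.mem_map.1 ha with ⟨q, hq, rfl⟩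
    have h1 := hlen q hq
    have hbp : b = path := by
      split at hb
      · exact List.mem_singleton.1 hb
      · simp at hb
    subst hbp
    rw [h1.1, PySem.Str.len_eq]
    exact h1.2

-- A's loop as a filter
theorem pvA_eq (path : String) (lm : List (String × String)) :
    find_all_matching_prefixes_py path lm =
      PySem.List.sorted ((PySem.List.dedup (lm.map Prod.fst)).filter (pvMatch path)) PySem.Str.len := by
  simp only [find_all_matching_prefixes_py]
  have hfun : (fun (acc : List String) (pfx : String) =>
      if (PySem.Chars.startswith path.toList (pfx.toList ++ ['/']) || path == pfx) = true
      then acc ++ [pfx] else acc) =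
      (fun (acc : List String) (pfx : String) => if pvMatch path pfx = true then acc ++ [pfx] else acc) := by
    funext acc pfx; simp only [pvMatch]; rfl
  rw [hfun, PySem.List.foldl_append_if_eq_filter (p := pvMatch path), List.nil_append]

-- ===== VERDICT (by name: the statement is the Claim_ definition above) =====
theorem find_all_matching_prefixes_py_spec : Claim_equal_find_all_matching_prefixes_py := by
  unfold Claim_equal_find_all_matching_prefixes_py
  intro path lm _
  unfold Spec_find_all_matching_prefixes_py
  rw [pvA_eq]
  apply PySem.List.sorted_eq_of_perm_of_pairwise_lt
  · have hnodupB : (find_all_matching_prefixes_py_alt path lm).Nodup :=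
      (pvPairwiseAlt path lm).imp (fun h => by intro he; subst he; exact lt_irrefl _ h)
    have hnodupA : ((PySem.List.dedup (lm.map Prod.fst)).filter (pvMatch path)).Nodup :=
      (PySem.List.nodup_dedup _).filter _
    refine (List.perm_ext_iff_of_nodup hnodupB hnodupA).2 ?_
    intro a
    rw [pvMemAlt, List.mem_filter, PySem.List.mem_dedup]
  · exact pvPairwiseAlt path lm
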